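-- pv_equiv track=rewrite | github.com/fangzheng123/PhVEC | model/bert_single/bert_single_ctc_process.py | decode_ctc_output
-- ===== SOURCE A (Python) =====
-- def decode_ctc_output(batch_pred_list):
--     """
--     解码ctc字符串
--     @param:
--     @return:
--     """
--     clean_output_list = []
--     for pred in batch_pred_list:
--         pred_char_list = pred.strip().split(" ")
--         pre_char = ""
--         filter_pred_list = []
--         for predict_char in pred_char_list:
--             if predict_char != pre_char and predict_char != "[unused1]":
--                 filter_pred_list.append(predict_char)
--             pre_char = predict_char
--         clean_output_list.append("".join(filter_pred_list).replace("[unused1]", ""))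
--     return clean_output_list
-- ===== SOURCE B (Python) =====
-- def _clean(pred):
--     tokens = pred.strip().split(" ")
--     # stage 1: collapse each run of consecutive equal tokens to one representative
--     reps = []
--     for t in tokens:
--         if not reps or reps[-1] != t:
--             reps.append(t)
--     # stage 2: drop blank representatives, join, and scrub any '[unused1]' formed across token boundaries
--     kept = [t for t in reps if t != "[unused1]"]
--     return "".join(kept).replace("[unused1]", "")
--
--
-- def decode_ctc_output(batch_pred_list):
--     return [_clean(pred) for pred in batch_pred_list]
-- ===== Notes on version B (the rewrite author's own statement) =====
-- stated objective: simpler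
-- what changed: Replaces A's single fused loop carrying an always-updated pre_char and an output accumulator per prediction by two separate stages (collapse consecutive-duplicate runs against the result's own last element, then filter blanks in a comprehension) mapped over the batch instead of appended in a loop.
import Mathlib
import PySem

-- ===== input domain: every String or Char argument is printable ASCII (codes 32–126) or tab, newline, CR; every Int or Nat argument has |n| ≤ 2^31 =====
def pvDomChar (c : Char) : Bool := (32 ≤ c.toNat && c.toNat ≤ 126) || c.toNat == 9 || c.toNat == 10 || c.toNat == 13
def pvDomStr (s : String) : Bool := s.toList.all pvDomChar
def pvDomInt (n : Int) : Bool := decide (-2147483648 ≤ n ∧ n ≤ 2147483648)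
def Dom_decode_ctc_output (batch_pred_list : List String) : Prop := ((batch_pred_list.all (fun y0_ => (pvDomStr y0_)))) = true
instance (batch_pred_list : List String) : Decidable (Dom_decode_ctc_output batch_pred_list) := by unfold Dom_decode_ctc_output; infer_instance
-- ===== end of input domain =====

-- B restructures A's fused per-prediction loop (accumulator + always-updated pre_char) into two
-- separate stages — collapse consecutive-duplicate runs, then filter blanks — mapped over the batch (objective: simpler).

-- ===== PORT A =====
-- s.split(" ") with the nonempty literal separator: split? is always `some` here, getD [] just unwraps it
def decode_ctc_output (batch_pred_list : List String) : List String :=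
  batch_pred_list.foldl
    (fun clean_output_list pred =>
      let pred_char_list := (PySem.Str.split? (PySem.Str.strip pred) " ").getD []
      let st := pred_char_list.foldl
        (fun (st : List String × String) predict_char =>
          if predict_char ≠ st.2 ∧ predict_char ≠ "[unused1]"
          then (st.1 ++ [predict_char], predict_char)
          else (st.1, predict_char))
        (([] : List String), "")
      clean_output_list ++ [PySem.Str.replace (PySem.Str.join "" st.1) "[unused1]" ""])
    []

-- ===== PORT B =====
def pvCollapse (tokens : List String) : List String :=
  tokens.foldl
    (fun reps t => if reps = [] ∨ reps.getLast? ≠ some t then reps ++ [t] else reps)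
    []

def pvClean (pred : String) : String :=
  let tokens := (PySem.Str.split? (PySem.Str.strip pred) " ").getD []
  let kept := (pvCollapse tokens).filter (fun t => t ≠ "[unused1]")
  PySem.Str.replace (PySem.Str.join "" kept) "[unused1]" ""

def decode_ctc_output_alt (batch_pred_list : List String) : List String :=
  batch_pred_list.map pvClean

-- ===== PRECONDITION & SPEC =====
def Spec_decode_ctc_output (batch_pred_list : List String) (out : List String) : Prop := out = decode_ctc_output_alt batch_pred_list
instance (batch_pred_list : List String) (out : List String) : Decidable (Spec_decode_ctc_output batch_pred_list out) := by unfold Spec_decode_ctc_output; infer_instance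

-- ===== CLAIM (what is proved, stated in full; the proofs are below) =====
def Claim_equal_decode_ctc_output : Prop := ∀ (batch_pred_list : List String), Dom_decode_ctc_output batch_pred_list → Spec_decode_ctc_output batch_pred_list (decode_ctc_output batch_pred_list)

-- ===== LEMMAS AND PROOFS =====

-- run-collapse with an optional "previous token", the common shape of both loops
def pvRuns : Option String → List String → List String
  | _, [] => []
  | o, t :: ts => if o = some t then pvRuns (some t) ts else t :: pvRuns (some t) ts

-- A's inner loop produces exactly the blank-filtered run representatives, seeded with pre_char
theorem pvRunsA (toks : List String) : ∀ (acc : List String) (pre : String),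
    (toks.foldl
      (fun (st : List String × String) predict_char =>
        if predict_char ≠ st.2 ∧ predict_char ≠ "[unused1]"
        then (st.1 ++ [predict_char], predict_char)
        else (st.1, predict_char))
      (acc, pre)).1
    = acc ++ (pvRuns (some pre) toks).filter (fun t => t ≠ "[unused1]") := by
  induction toks with
  | nil => intro acc pre; simp [pvRuns]
  | cons t ts ih =>
    intro acc pre
    simp only [List.foldl_cons]
    by_cases hpre : t = pre
    · subst hpre
      rw [if_neg (fun h => h.1 rfl)]
      rw [ih acc t]
      simp [pvRuns]
    · by_cases hu : t = "[unused1]"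
      · subst hu
        rw [if_neg (fun h => h.2 rfl)]
        rw [ih acc "[unused1]"]
        have h2 : ¬ (some pre = some ("[unused1]" : String)) :=
          fun h => hpre (Option.some.inj h).symm
        simp only [pvRuns, if_neg h2, List.filter_cons]
        simp
      · rw [if_pos ⟨hpre, hu⟩]
        rw [ih (acc ++ [t]) t]
        have h2 : ¬ (some pre = some t) := fun h => hpre (Option.some.inj h).symm
        simp only [pvRuns, if_neg h2, List.filter_cons]
        simp [hu]

-- B's collapse loop, generalized over the accumulator
theorem pvRunsB (toks : List String) : ∀ (acc : List String),
    toks.foldl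
      (fun reps t => if reps = [] ∨ reps.getLast? ≠ some t then reps ++ [t] else reps)
      acc
    = acc ++ pvRuns acc.getLast? toks := by
  induction toks with
  | nil => intro acc; simp [pvRuns]
  | cons t ts ih =>
    intro acc
    simp only [List.foldl_cons]
    rcases acc.eq_nil_or_concat with h | ⟨ys, l, rfl⟩
    · subst h
      rw [if_pos (Or.inl rfl), List.nil_append, ih [t]]
      simp [pvRuns]
    · simp only [List.concat_eq_append]
      by_cases hl : l = t
      · subst hl
        have hne : ¬ ((ys ++ [l] : List String) = [] ∨ (ys ++ [l]).getLast? ≠ some l) := by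
          simp
        rw [if_neg hne]
        rw [ih (ys ++ [l])]
        simp [pvRuns]
      · have hc : ((ys ++ [l] : List String) = [] ∨ (ys ++ [l]).getLast? ≠ some t) := by
          right; simp [hl]
        rw [if_pos hc]
        rw [ih (ys ++ [l] ++ [t])]
        have h2 : ¬ (some l = some t) := fun h => hl (Option.some.inj h)
        simp [pvRuns, h2]

-- "".join swallows a leading empty string
theorem join_empty_cons (l : List String) :
    PySem.Str.join "" ("" :: l) = PySem.Str.join "" l := by
  cases l with
  | nil => rfl
  | cons x xs =>
    unfold PySem.Str.join
    congr 1

-- seeding with pre_char = "" versus no previous token changes the join by at most a leading ""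
theorem join_filter_seed (toks : List String) :
    PySem.Str.join "" ((pvRuns (some "") toks).filter (fun t => t ≠ "[unused1]"))
    = PySem.Str.join "" ((pvRuns none toks).filter (fun t => t ≠ "[unused1]")) := by
  cases toks with
  | nil => rfl
  | cons t ts =>
    by_cases h : t = ""
    · subst h
      have h1 : (pvRuns (some "") ("" :: ts)) = pvRuns (some "") ts := by
        simp [pvRuns]
      have h2 : (pvRuns none ("" :: ts)) = "" :: pvRuns (some "") ts := by
        simp [pvRuns]
      rw [h1, h2]
      have h3 : List.filter (fun t => decide (t ≠ "[unused1]")) ("" :: pvRuns (some "") ts)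
          = "" :: List.filter (fun t => decide (t ≠ "[unused1]")) (pvRuns (some "") ts) := by
        simp
      rw [h3, join_empty_cons]
    · have h2 : ¬ (some ("" : String) = some t) := fun hh => h (Option.some.inj hh).symm
      simp [pvRuns, h2]

theorem foldl_snoc_eq_map (g : String → String) (l : List String) : ∀ (init : List String),
    l.foldl (fun out p => out ++ [g p]) init = init ++ l.map g := by
  induction l with
  | nil => intro init; simp
  | cons x xs ih => intro init; simp [ih]

theorem per_pred (pred : String) :
    PySem.Str.replace
      (PySem.Str.join ""
        ((((PySem.Str.split? (PySem.Str.strip pred) " ").getD []).foldl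
            (fun (st : List String × String) predict_char =>
              if predict_char ≠ st.2 ∧ predict_char ≠ "[unused1]"
              then (st.1 ++ [predict_char], predict_char)
              else (st.1, predict_char))
            (([] : List String), "")).1))
      "[unused1]" ""
    = pvClean pred := by
  simp only [pvClean, pvCollapse]
  rw [pvRunsA, pvRunsB]
  simp only [List.nil_append, List.getLast?_nil]
  rw [join_filter_seed]

-- ===== VERDICT (by name: the statement is the Claim_ definition above) =====
theorem decode_ctc_output_spec : Claim_equal_decode_ctc_output := by
  intro batch _
  unfold Spec_decode_ctc_output decode_ctc_output decode_ctc_output_alt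
  rw [foldl_snoc_eq_map]
  simp only [List.nil_append]
  exact List.map_congr_left (fun pred _ => per_pred pred)
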